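-- pv_equiv track=rewrite | github.com/osalas29/spiner-pro-app | main.py | patron_altos_bajos
-- ===== SOURCE A (Python) =====
-- from typing import List, Set, Tuple, Optional, Dict
--
-- COMBINACIONES_AB_PREDICCION = [
-- {"patrones": [
--         "BBBBBBB"
--     ],
-- "resultado_ab" : "BAJOS"
-- },
-- {"patrones": [
--         "ABBBBBB", "BABBBBB", "BBABBBB", "BBBABBB", "BBBBABB", "BBBBBAB", "BBBBBBA"
--     ],
-- "resultado_ab" : "ALTOS"
-- },
-- {"patrones": [
--         "AABBBBB", "ABABBBB", "ABBABBB", "ABBBABB", "ABBBBAB", "ABBBBBA", "BAABBBB",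
--         "BABABBB", "BABBABB", "BABBBAB", "BABBBBA", "BBAABBB", "BBABABB", "BBABBAB",
--         "BBABBBA", "BBBAABB", "BBBABAB", "BBBABBA", "BBBBAAB", "BBBBABA", "BBBBBAA"
--     ],
-- "resultado_ab" : "BAJOS"
-- },
-- {"patrones": [
--         "AAABBBB", "AABABBB", "AABBABB", "AABBBAB", "AABBBBA", "ABAABBB", "ABABABB",
--         "ABABBAB", "ABABBBA", "ABBAABB", "ABBABAB", "ABBABBA", "ABBBAAB", "ABBBABA",
--         "ABBBBAA", "BAAABBB", "BAABABB", "BAABBAB", "BAABBBA", "BABAABB", "BABABAB",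
--         "BABABBA", "BABBAAB", "BABBABA", "BABBBAA", "BBAAABB", "BBAABAB", "BBAABBA",
--         "BBABAAB", "BBABABA", "BBABBAA", "BBBAAAB", "BBBAABA", "BBBABAA", "BBBBAAA"
--     ],
-- "resultado_ab" : "ALTOS"
-- },
-- {"patrones": [
--         "AAAABBB", "AAABABB", "AAABBAB", "AAABBBA", "AABAABB", "AABABAB", "AABABBA",
--         "AABBAAB", "AABBABA", "AABBBAA", "ABAAABB", "ABAABAB", "ABAABBA", "ABABAAB",
--         "ABABABA", "ABABBAA", "ABBAAAB", "ABBAABA", "ABBABAA", "ABBBAAA", "BAAAABB",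
--         "BAAABAB", "BAAABBA", "BAABAAB", "BAABABA", "BAABBAA", "BABAAAB", "BABAABA",
--         "BABABAA", "BABBAAA", "BBAAAAB", "BBAAABA", "BBAABAA", "BBABAAA", "BBBAAAA"
--     ],
-- "resultado_ab" : "BAJOS"
-- },
-- {"patrones": [
--         "AAAAABB", "AAAABAB", "AAAABBA", "AAABAAB", "AAABABA", "AAABBAA", "AABAAAB",
--         "AABAABA", "AABABAA", "AABBAAA", "ABAAAAB", "ABAAABA", "ABAABAA", "ABABAAA",
--         "ABBAAAA", "BAAAAAB", "BAAAABA", "BAAABAA", "BAABAAA", "BABAAAA", "BBAAAAA"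
--     ],
-- "resultado_ab" : "ALTOS"
-- },
-- {"patrones": [
--         "AAAAAAB", "AAAAABA", "AAAABAA", "AAABAAA", "AABAAAA", "ABAAAAA", "BAAAAAA"
--     ],
-- "resultado_ab" : "BAJOS"
-- },
-- {"patrones": [
--         "AAAAAAA"
--     ],
-- "resultado_ab" : "ALTOS"
-- }
-- ]
--
-- LONGITUD_BLOQUE = 7
--
-- def alto_bajo_token(n: int) -> str:
--     """Mapea un número de ruleta a 'A' (Alto) o 'B' (Bajo). 0 se trata como Bajo."""
--     if 1 <= n <= 18:
--         return 'B'
--     elif 19 <= n <= 36: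
--         return 'A'
--     else: # n == 0
--         return 'B'
--
-- def patron_altos_bajos(bloque: List[int]) -> Tuple[Optional[str], Optional[str], Tuple[int, int]]:
--     N = LONGITUD_BLOQUE
--
--     # Usamos solo los últimos N números para el análisis de patrón, incluso si el bloque es más largo (historial)
--     analisis_bloque = bloque[-N:]
--
--     if len(analisis_bloque) < N:
--         # Lógica para mostrar el conteo parcial (si no está completo)
--         bajos_parcial = sum(1 for n in analisis_bloque if 1 <= n <= 18 or n == 0)
--         altos_parcial = sum(1 for n in analisis_bloque if 19 <= n <= 36)
--         return None, None, (bajos_parcial, altos_parcial)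
--
--     # Crear la cadena de patrón (ej: "AABBBBB")
--     tokens_ab = [alto_bajo_token(n) for n in analisis_bloque]
--     patron_string = "".join(tokens_ab)
--
--     bajos_final = sum(1 for token in tokens_ab if token == 'B')
--     altos_final = sum(1 for token in tokens_ab if token == 'A')
--
--     for entry in COMBINACIONES_AB_PREDICCION:
--         if patron_string in entry["patrones"]:
--             # El resultado es "ALTOS" o "BAJOS"
--             return entry["resultado_ab"], patron_string, (bajos_final, altos_final)
--
--     # Si el bloque está completo pero el patrón no está en el diccionario
--     return None, None, (bajos_final, altos_final)
-- ===== SOURCE B (Python) =====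
-- from typing import List, Tuple, Optional
--
-- LONGITUD_BLOQUE = 7
--
-- def patron_altos_bajos(bloque: List[int]) -> Tuple[Optional[str], Optional[str], Tuple[int, int]]:
--     analisis = bloque[-LONGITUD_BLOQUE:]
--     if len(analisis) < LONGITUD_BLOQUE:
--         bajos = sum(1 for n in analisis if 0 <= n <= 18)
--         altos = sum(1 for n in analisis if 19 <= n <= 36)
--         return None, None, (bajos, altos)
--     patron = "".join('A' if 19 <= n <= 36 else 'B' for n in analisis)
--     altos = patron.count('A')
--     resultado = "ALTOS" if altos % 2 == 1 else "BAJOS"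
--     return resultado, patron, (LONGITUD_BLOQUE - altos, altos)
-- ===== Notes on version B (the rewrite author's own statement) =====
-- stated objective: simpler
-- what changed: Replaced the 128-entry pattern table and its linear membership scan by the closed-form parity rule: the block is ALTOS iff the count of 'A' tokens is odd, so the table is deleted entirely.
import Mathlib
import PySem

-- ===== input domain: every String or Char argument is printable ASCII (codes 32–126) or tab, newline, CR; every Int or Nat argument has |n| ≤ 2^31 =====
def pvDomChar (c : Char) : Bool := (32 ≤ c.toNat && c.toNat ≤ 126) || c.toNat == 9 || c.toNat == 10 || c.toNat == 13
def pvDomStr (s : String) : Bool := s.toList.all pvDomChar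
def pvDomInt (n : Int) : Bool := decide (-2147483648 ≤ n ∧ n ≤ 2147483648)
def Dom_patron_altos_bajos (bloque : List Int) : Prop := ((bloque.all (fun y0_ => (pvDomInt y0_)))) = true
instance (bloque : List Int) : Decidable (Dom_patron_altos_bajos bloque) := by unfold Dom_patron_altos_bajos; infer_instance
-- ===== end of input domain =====

-- B replaces A's 128-entry pattern table and its membership scan by the closed-form parity
-- rule (odd count of 'A' tokens ⇒ "ALTOS", even ⇒ "BAJOS"); objective: simpler.

-- ===== PORT A =====
def COMBINACIONES_AB_PREDICCION : List (List String × String) := [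
  (["BBBBBBB"], "BAJOS"),
  (["ABBBBBB", "BABBBBB", "BBABBBB", "BBBABBB", "BBBBABB", "BBBBBAB", "BBBBBBA"], "ALTOS"),
  (["AABBBBB", "ABABBBB", "ABBABBB", "ABBBABB", "ABBBBAB", "ABBBBBA", "BAABBBB", "BABABBB", "BABBABB", "BABBBAB", "BABBBBA", "BBAABBB", "BBABABB", "BBABBAB", "BBABBBA", "BBBAABB", "BBBABAB", "BBBABBA", "BBBBAAB", "BBBBABA", "BBBBBAA"], "BAJOS"),
  (["AAABBBB", "AABABBB", "AABBABB", "AABBBAB", "AABBBBA", "ABAABBB", "ABABABB", "ABABBAB", "ABABBBA", "ABBAABB", "ABBABAB", "ABBABBA", "ABBBAAB", "ABBBABA", "ABBBBAA", "BAAABBB", "BAABABB", "BAABBAB", "BAABBBA", "BABAABB", "BABABAB", "BABABBA", "BABBAAB", "BABBABA", "BABBBAA", "BBAAABB", "BBAABAB", "BBAABBA", "BBABAAB", "BBABABA", "BBABBAA", "BBBAAAB", "BBBAABA", "BBBABAA", "BBBBAAA"], "ALTOS"),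
  (["AAAABBB", "AAABABB", "AAABBAB", "AAABBBA", "AABAABB", "AABABAB", "AABABBA", "AABBAAB", "AABBABA", "AABBBAA", "ABAAABB", "ABAABAB", "ABAABBA", "ABABAAB", "ABABABA", "ABABBAA", "ABBAAAB", "ABBAABA", "ABBABAA", "ABBBAAA", "BAAAABB", "BAAABAB", "BAAABBA", "BAABAAB", "BAABABA", "BAABBAA", "BABAAAB", "BABAABA", "BABABAA", "BABBAAA", "BBAAAAB", "BBAAABA", "BBAABAA", "BBABAAA", "BBBAAAA"], "BAJOS"),
  (["AAAAABB", "AAAABAB", "AAAABBA", "AAABAAB", "AAABABA", "AAABBAA", "AABAAAB", "AABAABA", "AABABAA", "AABBAAA", "ABAAAAB", "ABAAABA", "ABAABAA", "ABABAAA", "ABBAAAA", "BAAAAAB", "BAAAABA", "BAAABAA", "BAABAAA", "BABAAAA", "BBAAAAA"], "ALTOS"),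
  (["AAAAAAB", "AAAAABA", "AAAABAA", "AAABAAA", "AABAAAA", "ABAAAAA", "BAAAAAA"], "BAJOS"),
  (["AAAAAAA"], "ALTOS")]

def alto_bajo_token (n : Int) : String :=
  if 1 ≤ n ∧ n ≤ 18 then "B"
  else if 19 ≤ n ∧ n ≤ 36 then "A"
  else "B"

def patron_altos_bajos (bloque : List Int) : Option String × Option String × (Int × Int) :=
  let analisis := PySem.List.slice bloque (some (-7)) none
  if analisis.length < 7 then
    (none, none,
      ((analisis.countP (fun n => decide ((1 ≤ n ∧ n ≤ 18) ∨ n = 0)) : Int),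
       (analisis.countP (fun n => decide (19 ≤ n ∧ n ≤ 36)) : Int)))
  else
    let tokens := analisis.map alto_bajo_token
    let patron := PySem.Str.join "" tokens
    let bajos : Int := (tokens.countP (fun t => t == "B") : Int)
    let altos : Int := (tokens.countP (fun t => t == "A") : Int)
    match COMBINACIONES_AB_PREDICCION.find? (fun e => e.1.contains patron) with
    | some e => (some e.2, some patron, (bajos, altos))
    | none => (none, none, (bajos, altos))

-- ===== PORT B =====
def patron_altos_bajos_alt (bloque : List Int) : Option String × Option String × (Int × Int) :=
  let analisis := PySem.List.slice bloque (some (-7)) none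
  if analisis.length < 7 then
    (none, none,
      ((analisis.countP (fun n => decide (0 ≤ n ∧ n ≤ 18)) : Int),
       (analisis.countP (fun n => decide (19 ≤ n ∧ n ≤ 36)) : Int)))
  else
    let patron := PySem.Str.join "" (analisis.map (fun n => if 19 ≤ n ∧ n ≤ 36 then "A" else "B"))
    let altos : Int := (PySem.Str.count patron "A" : Int)
    let resultado := if PySem.Int.mod altos 2 == 1 then "ALTOS" else "BAJOS"
    (some resultado, some patron, (7 - altos, altos))

-- ===== PRECONDITION & SPEC =====
def Spec_patron_altos_bajos (bloque : List Int) (out : Option String × Option String × (Int × Int)) : Prop := out = patron_altos_bajos_alt bloque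
instance (bloque : List Int) (out : Option String × Option String × (Int × Int)) : Decidable (Spec_patron_altos_bajos bloque out) := by unfold Spec_patron_altos_bajos; infer_instance

-- ===== CLAIM (what is proved, stated in full; the proofs are below) =====
def Claim_equal_patron_altos_bajos : Prop := ∀ (bloque : List Int), Dom_patron_altos_bajos bloque → Spec_patron_altos_bajos bloque (patron_altos_bajos bloque)

-- ===== LEMMAS AND PROOFS =====
theorem tok_eq (n : Int) :
    alto_bajo_token n = if 19 ≤ n ∧ n ≤ 36 then "A" else "B" := by
  unfold alto_bajo_token
  split_ifs with h1 h2 h2 <;> first | rfl | omega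

theorem countP_bajos (xs : List Int) :
    xs.countP (fun n => decide ((1 ≤ n ∧ n ≤ 18) ∨ n = 0))
      = xs.countP (fun n => decide (0 ≤ n ∧ n ≤ 18)) := by
  have h : (fun n : Int => decide ((1 ≤ n ∧ n ≤ 18) ∨ n = 0))
      = (fun n : Int => decide (0 ≤ n ∧ n ≤ 18)) := by
    funext n; rw [decide_eq_decide]; omega
  rw [h]

theorem full_case (a b c d e f g : Int) :
    (let analisis := [a, b, c, d, e, f, g]
     let tokens := analisis.map alto_bajo_token
     let patron := PySem.Str.join "" tokens
     let bajos : Int := (tokens.countP (fun t => t == "B") : Int)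
     let altos : Int := (tokens.countP (fun t => t == "A") : Int)
     match COMBINACIONES_AB_PREDICCION.find? (fun e => e.1.contains patron) with
     | some e => (some e.2, some patron, (bajos, altos))
     | none => (none, none, (bajos, altos)))
    = (let analisis := [a, b, c, d, e, f, g]
       let patron := PySem.Str.join "" (analisis.map (fun n => if 19 ≤ n ∧ n ≤ 36 then "A" else "B"))
       let altos : Int := (PySem.Str.count patron "A" : Int)
       let resultado := if PySem.Int.mod altos 2 == 1 then "ALTOS" else "BAJOS"
       ((some resultado : Option String), some patron, (7 - altos, altos))) := by
  by_cases h1 : 19 ≤ a ∧ a ≤ 36 <;> by_cases h2 : 19 ≤ b ∧ b ≤ 36 <;>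
    by_cases h3 : 19 ≤ c ∧ c ≤ 36 <;> by_cases h4 : 19 ≤ d ∧ d ≤ 36 <;>
    by_cases h5 : 19 ≤ e ∧ e ≤ 36 <;> by_cases h6 : 19 ≤ f ∧ f ≤ 36 <;>
    by_cases h7 : 19 ≤ g ∧ g ≤ 36 <;>
    simp only [List.map_cons, List.map_nil, tok_eq, h1, h2, h3, h4, h5, h6, h7] <;> decide

-- ===== VERDICT (by name: the statement is the Claim_ definition above) =====
theorem patron_altos_bajos_spec : Claim_equal_patron_altos_bajos := by
  intro bloque _
  unfold Spec_patron_altos_bajos patron_altos_bajos patron_altos_bajos_alt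
  by_cases hl : (PySem.List.slice bloque (some (-7)) none).length < 7
  · simp only [hl, if_true, countP_bajos]
  · simp only [hl, if_false]
    have h7 : (PySem.List.slice bloque (some (-7)) none).length = 7 := by
      rw [PySem.List.slice_from_neg_ofNat bloque 7 (by omega)]
      rw [PySem.List.slice_from_neg_ofNat bloque 7 (by omega)] at hl
      simp only [List.length_drop] at hl ⊢
      omega
    rcases hx : PySem.List.slice bloque (some (-7)) none with _ | ⟨a, _ | ⟨b, _ | ⟨c, _ | ⟨d, _ | ⟨e, _ | ⟨f, _ | ⟨g, _ | ⟨h, t⟩⟩⟩⟩⟩⟩⟩⟩ <;>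
      rw [hx] at h7 <;> simp only [List.length] at h7 <;> try omega
    exact full_case a b c d e f g
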